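-- pv_equiv track=rewrite | github.com/mrln13/EDX-Knot-Theory | Data Analysis/simulate_scan_order_from_cache.py | edge_starts
-- ===== SOURCE A (Python) =====
-- from typing import List, Tuple, Dict, Optional
--
-- def edge_starts(coords_sorted: List[Tuple[int,int]]) -> List[Tuple[int,int]]:
--     """
--     All tiles that lie on the bounding-box perimeter:
--     r == rmin or r == rmax or c == cmin or c == cmax.
--     (Only returns tiles that actually exist in coords_sorted.)
--     """
--     if not coords_sorted:
--         return []
--     rmin = min(r for r, _ in coords_sorted)
--     rmax = max(r for r, _ in coords_sorted)
--     cmin = min(c for _, c in coords_sorted)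
--     cmax = max(c for _, c in coords_sorted)
--     return [(r, c) for (r, c) in coords_sorted
--             if r == rmin or r == rmax or c == cmin or c == cmax]
-- ===== SOURCE B (Python) =====
-- def edge_starts(coords_sorted):
--     if not coords_sorted:
--         return []
--     by_row = {}
--     by_col = {}
--     for i, (r, c) in enumerate(coords_sorted):
--         by_row.setdefault(r, []).append(i)
--         by_col.setdefault(c, []).append(i)
--     keep = sorted(set(by_row[min(by_row)] + by_row[max(by_row)]
--                       + by_col[min(by_col)] + by_col[max(by_col)]))
--     return [coords_sorted[i] for i in keep]
-- ===== Notes on version B (the rewrite author's own statement) =====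
-- stated objective: alternative
-- what changed: Instead of four min/max scans plus a predicate filter over the points, B groups indices by row and by column into two dicts in one enumerate pass, takes min/max over the dict keys (the distinct rows/columns), unions the four extreme index groups into a set, and emits the points at sorted(set(indices)).
import Mathlib
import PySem

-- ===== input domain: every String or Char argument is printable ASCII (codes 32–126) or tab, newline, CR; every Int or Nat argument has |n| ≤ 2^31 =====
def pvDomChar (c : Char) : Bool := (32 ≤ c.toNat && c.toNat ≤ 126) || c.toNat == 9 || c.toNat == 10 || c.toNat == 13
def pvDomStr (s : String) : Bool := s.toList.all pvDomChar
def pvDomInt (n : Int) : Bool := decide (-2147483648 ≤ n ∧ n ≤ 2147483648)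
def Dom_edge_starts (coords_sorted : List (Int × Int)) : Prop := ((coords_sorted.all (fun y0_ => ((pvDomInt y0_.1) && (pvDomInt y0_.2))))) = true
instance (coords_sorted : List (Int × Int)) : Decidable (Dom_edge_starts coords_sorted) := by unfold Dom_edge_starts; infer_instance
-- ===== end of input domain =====

-- B replaces A's four min/max scans + predicate filter by hash-grouping indices by row and by column,
-- taking the union of the four extreme groups as an index set and emitting sorted(set(indices)) (alternative decomposition).

-- ===== PORT A =====
-- min(gen)/max(gen) over a nonempty list: PySem.List.min?/max?; the .getD 0 default is unreachable (the guard ensures nonemptiness)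
def edge_starts (coords_sorted : List (Int × Int)) : List (Int × Int) :=
  if coords_sorted = [] then []
  else
    let rmin := (PySem.List.min? (coords_sorted.map Prod.fst) (fun r => r)).getD 0
    let rmax := (PySem.List.max? (coords_sorted.map Prod.fst) (fun r => r)).getD 0
    let cmin := (PySem.List.min? (coords_sorted.map Prod.snd) (fun c => c)).getD 0
    let cmax := (PySem.List.max? (coords_sorted.map Prod.snd) (fun c => c)).getD 0
    coords_sorted.filter (fun p => p.1 == rmin || p.1 == rmax || p.2 == cmin || p.2 == cmax)

-- ===== PORT B =====
-- the 'for i, (r, c) in enumerate(...)' loop filling both dicts; setdefault(k, []).append(i) = modify k [] (· ++ [i])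
def fillDicts : List (Int × (Int × Int)) → PySem.Dict Int (List Int) × PySem.Dict Int (List Int) →
    PySem.Dict Int (List Int) × PySem.Dict Int (List Int)
  | [], dd => dd
  | q :: t, dd => fillDicts t (dd.1.modify q.2.1 [] (fun l => l ++ [q.1]), dd.2.modify q.2.2 [] (fun l => l ++ [q.1]))

-- min/max of a dict iterate its keys (nonempty here, so .getD 0 is unreachable);
-- by_row[rmin] etc.: the key is provably present, so getD [] equals Python's d[k];
-- coords_sorted[i]: every i in keep is in range, so the .getD (0, 0) default is unreachable
def edge_starts_alt (coords_sorted : List (Int × Int)) : List (Int × Int) :=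
  if coords_sorted = [] then []
  else
    let dicts := fillDicts (PySem.List.enumerate coords_sorted) (PySem.Dict.empty, PySem.Dict.empty)
    let byRow := dicts.1
    let byCol := dicts.2
    let rmin := (PySem.List.min? byRow.keys (fun k => k)).getD 0
    let rmax := (PySem.List.max? byRow.keys (fun k => k)).getD 0
    let cmin := (PySem.List.min? byCol.keys (fun k => k)).getD 0
    let cmax := (PySem.List.max? byCol.keys (fun k => k)).getD 0
    let keep := PySem.List.sorted
      (PySem.Set.ofList (byRow.getD rmin [] ++ byRow.getD rmax [] ++ byCol.getD cmin [] ++ byCol.getD cmax []))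
      (fun i => i)
    keep.map (fun i => (PySem.List.pyGet? coords_sorted i).getD (0, 0))

-- ===== PRECONDITION & SPEC =====
def Spec_edge_starts (coords_sorted : List (Int × Int)) (out : List (Int × Int)) : Prop := out = edge_starts_alt coords_sorted
instance (coords_sorted : List (Int × Int)) (out : List (Int × Int)) : Decidable (Spec_edge_starts coords_sorted out) := by unfold Spec_edge_starts; infer_instance

-- ===== CLAIM (what is proved, stated in full; the proofs are below) =====
def Claim_equal_edge_starts : Prop := ∀ (coords_sorted : List (Int × Int)), Dom_edge_starts coords_sorted → Spec_edge_starts coords_sorted (edge_starts coords_sorted)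

-- ===== LEMMAS AND PROOFS =====

-- the row-dict / col-dict components of the loop, as folds
def byRowD (cs : List (Int × Int)) : PySem.Dict Int (List Int) :=
  (PySem.List.enumerate cs).foldl (fun d q => d.modify q.2.1 [] (fun l => l ++ [q.1])) PySem.Dict.empty
def byColD (cs : List (Int × Int)) : PySem.Dict Int (List Int) :=
  (PySem.List.enumerate cs).foldl (fun d q => d.modify q.2.2 [] (fun l => l ++ [q.1])) PySem.Dict.empty

theorem fillDicts_eq (l : List (Int × (Int × Int)))
    (dd : PySem.Dict Int (List Int) × PySem.Dict Int (List Int)) :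
    fillDicts l dd = (l.foldl (fun d q => d.modify q.2.1 [] (fun l => l ++ [q.1])) dd.1,
                      l.foldl (fun d q => d.modify q.2.2 [] (fun l => l ++ [q.1])) dd.2) := by
  induction l generalizing dd with
  | nil => simp [fillDicts]
  | cons q t ih => simp [fillDicts, ih]

theorem min?_ofList_int (xs : List Int) :
    PySem.List.min? (PySem.Set.ofList xs) (fun i => i) = PySem.List.min? xs (fun i => i) := by
  cases h1 : PySem.List.min? (PySem.Set.ofList xs) (fun i : Int => i) with
  | none =>
    rw [PySem.List.min?_eq_none_iff] at h1
    cases h2 : PySem.List.min? xs (fun i : Int => i) with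
    | none => rfl
    | some m =>
      have hm := PySem.List.min?_mem h2
      have : m ∈ PySem.Set.ofList xs := (PySem.Set.mem_ofList xs m).mpr hm
      simp [h1] at this
  | some m =>
    have hm : m ∈ xs := (PySem.Set.mem_ofList xs m).mp (PySem.List.min?_mem h1)
    cases h2 : PySem.List.min? xs (fun i : Int => i) with
    | none =>
      rw [PySem.List.min?_eq_none_iff] at h2; simp [h2] at hm
    | some m' =>
      have hm' : m' ∈ xs := PySem.List.min?_mem h2
      have h12 : m ≤ m' := PySem.List.min?_isMin h1 m' ((PySem.Set.mem_ofList xs m').mpr hm')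
      have h21 : m' ≤ m := PySem.List.min?_isMin h2 m hm
      exact congrArg some (le_antisymm h12 h21)

theorem max?_ofList_int (xs : List Int) :
    PySem.List.max? (PySem.Set.ofList xs) (fun i => i) = PySem.List.max? xs (fun i => i) := by
  cases h1 : PySem.List.max? (PySem.Set.ofList xs) (fun i : Int => i) with
  | none =>
    rw [PySem.List.max?_eq_none_iff] at h1
    cases h2 : PySem.List.max? xs (fun i : Int => i) with
    | none => rfl
    | some m =>
      have hm := PySem.List.max?_mem h2
      have : m ∈ PySem.Set.ofList xs := (PySem.Set.mem_ofList xs m).mpr hm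
      simp [h1] at this
  | some m =>
    have hm : m ∈ xs := (PySem.Set.mem_ofList xs m).mp (PySem.List.max?_mem h1)
    cases h2 : PySem.List.max? xs (fun i : Int => i) with
    | none =>
      rw [PySem.List.max?_eq_none_iff] at h2; simp [h2] at hm
    | some m' =>
      have hm' : m' ∈ xs := PySem.List.max?_mem h2
      have h12 : m' ≤ m := PySem.List.max?_isMax h1 m' ((PySem.Set.mem_ofList xs m').mpr hm')
      have h21 : m ≤ m' := PySem.List.max?_isMax h2 m hm
      exact congrArg some (le_antisymm h21 h12)

-- the keys of the grouping dicts are exactly the distinct rows / columns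
theorem keys_byRowD (cs : List (Int × Int)) :
    (byRowD cs).keys = PySem.Set.ofList (cs.map Prod.fst) := by
  have h := PySem.Dict.keys_foldl_modify_key (PySem.List.enumerate cs)
    (fun q => q.2.1) ([] : List Int) (fun _ q l => l ++ [q.1]) PySem.Dict.empty
  have hmap : (PySem.List.enumerate cs).map (fun q => q.2.1) = cs.map Prod.fst := by
    have hs := PySem.List.map_snd_enumerate cs 0
    calc (PySem.List.enumerate cs).map (fun q => q.2.1)
        = ((PySem.List.enumerate cs).map (fun q => q.2)).map Prod.fst := by rw [List.map_map]; rfl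
      _ = cs.map Prod.fst := by rw [hs]
  have hupd : PySem.Set.update ((PySem.Dict.empty : PySem.Dict Int (List Int)).keys) (cs.map Prod.fst)
      = PySem.Set.ofList (cs.map Prod.fst) := by
    rw [PySem.Set.ofList_eq_foldl]; rfl
  unfold byRowD
  exact h.trans (by rw [hmap, hupd])

theorem keys_byColD (cs : List (Int × Int)) :
    (byColD cs).keys = PySem.Set.ofList (cs.map Prod.snd) := by
  have h := PySem.Dict.keys_foldl_modify_key (PySem.List.enumerate cs)
    (fun q => q.2.2) ([] : List Int) (fun _ q l => l ++ [q.1]) PySem.Dict.empty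
  have hmap : (PySem.List.enumerate cs).map (fun q => q.2.2) = cs.map Prod.snd := by
    have hs := PySem.List.map_snd_enumerate cs 0
    calc (PySem.List.enumerate cs).map (fun q => q.2.2)
        = ((PySem.List.enumerate cs).map (fun q => q.2)).map Prod.snd := by rw [List.map_map]; rfl
      _ = cs.map Prod.snd := by rw [hs]
  have hupd : PySem.Set.update ((PySem.Dict.empty : PySem.Dict Int (List Int)).keys) (cs.map Prod.snd)
      = PySem.Set.ofList (cs.map Prod.snd) := by
    rw [PySem.Set.ofList_eq_foldl]; rfl
  unfold byColD
  exact h.trans (by rw [hmap, hupd])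

-- membership in a row group: the indices whose row is v
theorem mem_group_byRowD (cs : List (Int × Int)) (v i : Int) :
    i ∈ (byRowD cs).getD v [] ↔
      ∃ k : Nat, k < cs.length ∧ i = (k : Int) ∧ (cs.getD k (0, 0)).1 = v := by
  have hfold : byRowD cs
      = ((PySem.List.enumerate cs).map (fun q => (q.2.1, q.1))).foldl
          (fun d p => d.modify p.1 [] (fun l => l ++ [p.2])) PySem.Dict.empty := by
    unfold byRowD
    rw [List.foldl_map]
  rw [hfold, PySem.Dict.getD_foldl_modify_append]
  simp only [List.mem_append, List.mem_map, List.mem_filter, PySem.List.mem_enumerate_iff]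
  constructor
  · rintro (h | ⟨p, ⟨⟨q, ⟨k, hk, rfl⟩, rfl⟩, hv⟩, rfl⟩)
    · simp at h
    · simp only [beq_iff_eq] at hv
      refine ⟨k, hk, by simp, ?_⟩
      rw [List.getD_eq_getElem _ _ hk]
      exact hv
  · rintro ⟨k, hk, rfl, hv⟩
    right
    rw [List.getD_eq_getElem _ _ hk] at hv
    exact ⟨(v, (k : Int)), ⟨⟨((0 : Int) + k, cs[k]), ⟨k, hk, rfl⟩, by simp [hv]⟩, by simp⟩, rfl⟩

theorem mem_group_byColD (cs : List (Int × Int)) (v i : Int) :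
    i ∈ (byColD cs).getD v [] ↔
      ∃ k : Nat, k < cs.length ∧ i = (k : Int) ∧ (cs.getD k (0, 0)).2 = v := by
  have hfold : byColD cs
      = ((PySem.List.enumerate cs).map (fun q => (q.2.2, q.1))).foldl
          (fun d p => d.modify p.1 [] (fun l => l ++ [p.2])) PySem.Dict.empty := by
    unfold byColD
    rw [List.foldl_map]
  rw [hfold, PySem.Dict.getD_foldl_modify_append]
  simp only [List.mem_append, List.mem_map, List.mem_filter, PySem.List.mem_enumerate_iff]
  constructor
  · rintro (h | ⟨p, ⟨⟨q, ⟨k, hk, rfl⟩, rfl⟩, hv⟩, rfl⟩)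
    · simp at h
    · simp only [beq_iff_eq] at hv
      refine ⟨k, hk, by simp, ?_⟩
      rw [List.getD_eq_getElem _ _ hk]
      exact hv
  · rintro ⟨k, hk, rfl, hv⟩
    right
    rw [List.getD_eq_getElem _ _ hk] at hv
    exact ⟨(v, (k : Int)), ⟨⟨((0 : Int) + k, cs[k]), ⟨k, hk, rfl⟩, by simp [hv]⟩, by simp⟩, rfl⟩

theorem sorted_union_indices (cs : List (Int × Int)) (P : Int × Int → Bool) (u : List Int)
    (hu : ∀ i : Int, i ∈ u ↔ ∃ k : Nat, k < cs.length ∧ i = (k : Int) ∧ P (cs.getD k (0, 0)) = true) :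
    PySem.List.sorted (PySem.Set.ofList u) (fun i => i) =
      ((List.range cs.length).filter (fun k => P (cs.getD k (0, 0)))).map (fun k => ((k : Nat) : Int)) := by
  have hndf : ((List.range cs.length).filter (fun k => P (cs.getD k (0, 0)))).Nodup :=
    List.Nodup.filter _ List.nodup_range
  have hnd : (((List.range cs.length).filter (fun k => P (cs.getD k (0, 0)))).map (fun k => ((k : Nat) : Int))).Nodup := by
    refine List.Nodup.map ?_ hndf
    intro a b h; simpa using h
  apply PySem.List.sorted_eq_of_perm_of_pairwise_lt
  · rw [List.perm_ext_iff_of_nodup hnd (PySem.Set.nodup_ofList u)]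
    intro i
    simp only [List.mem_map, List.mem_filter, List.mem_range, PySem.Set.mem_ofList, hu]
    constructor
    · rintro ⟨k, ⟨hk, hp⟩, rfl⟩; exact ⟨k, hk, rfl, hp⟩
    · rintro ⟨k, hk, rfl, hp⟩; exact ⟨k, ⟨hk, hp⟩, rfl⟩
  · refine List.Pairwise.map _ (fun a b h => ?_) (List.Pairwise.filter _ List.pairwise_lt_range)
    exact_mod_cast h

theorem map_getD_filter_range (cs : List (Int × Int)) (P : Int × Int → Bool) :
    ((List.range cs.length).filter (fun k => P (cs.getD k (0, 0)))).map (fun k => cs.getD k (0, 0))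
      = cs.filter P := by
  induction cs with
  | nil => rfl
  | cons a tl ih =>
    have hlen : (a :: tl).length = tl.length + 1 := rfl
    rw [hlen, List.range_succ_eq_map]
    simp only [List.filter_cons, List.filter_map, List.getD_cons_zero]
    by_cases hp : P a = true
    · simp only [hp, if_pos, List.map_cons, List.map_map]
      refine congrArg (a :: ·) ?_
      simpa [Function.comp] using ih
    · simp only [hp, Bool.false_eq_true]
      simpa [Function.comp, hp] using ih

-- ===== VERDICT (by name: the statement is the Claim_ definition above) =====
theorem edge_starts_spec : Claim_equal_edge_starts := by
  intro cs _
  unfold Spec_edge_starts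
  by_cases hcs : cs = []
  · simp [edge_starts, edge_starts_alt, hcs]
  · have ha : (PySem.List.min? (byRowD cs).keys (fun k => k)).getD 0
        = (PySem.List.min? (cs.map Prod.fst) (fun r => r)).getD 0 := by
      rw [keys_byRowD, min?_ofList_int]
    have hb : (PySem.List.max? (byRowD cs).keys (fun k => k)).getD 0
        = (PySem.List.max? (cs.map Prod.fst) (fun r => r)).getD 0 := by
      rw [keys_byRowD, max?_ofList_int]
    have hc : (PySem.List.min? (byColD cs).keys (fun k => k)).getD 0
        = (PySem.List.min? (cs.map Prod.snd) (fun c => c)).getD 0 := by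
      rw [keys_byColD, min?_ofList_int]
    have hd : (PySem.List.max? (byColD cs).keys (fun k => k)).getD 0
        = (PySem.List.max? (cs.map Prod.snd) (fun c => c)).getD 0 := by
      rw [keys_byColD, max?_ofList_int]
    have hB : edge_starts_alt cs
        = (PySem.List.sorted (PySem.Set.ofList (
            (byRowD cs).getD ((PySem.List.min? (byRowD cs).keys (fun k => k)).getD 0) []
            ++ (byRowD cs).getD ((PySem.List.max? (byRowD cs).keys (fun k => k)).getD 0) []
            ++ (byColD cs).getD ((PySem.List.min? (byColD cs).keys (fun k => k)).getD 0) []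
            ++ (byColD cs).getD ((PySem.List.max? (byColD cs).keys (fun k => k)).getD 0) []))
            (fun i => i)).map (fun i => (PySem.List.pyGet? cs i).getD (0, 0)) := by
      simp only [edge_starts_alt, if_neg hcs, fillDicts_eq, byRowD, byColD]
    rw [hB, ha, hb, hc, hd]
    set a := (PySem.List.min? (cs.map Prod.fst) (fun r => r)).getD 0 with h_a
    set b := (PySem.List.max? (cs.map Prod.fst) (fun r => r)).getD 0 with h_b
    set c := (PySem.List.min? (cs.map Prod.snd) (fun c => c)).getD 0 with h_c
    set d := (PySem.List.max? (cs.map Prod.snd) (fun c => c)).getD 0 with h_d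
    have hu : ∀ i : Int,
        i ∈ ((byRowD cs).getD a [] ++ (byRowD cs).getD b [] ++ (byColD cs).getD c [] ++ (byColD cs).getD d []) ↔
        ∃ k : Nat, k < cs.length ∧ i = (k : Int) ∧
          ((fun p : Int × Int => p.1 == a || p.1 == b || p.2 == c || p.2 == d) (cs.getD k (0, 0))) = true := by
      intro i
      simp only [List.mem_append, mem_group_byRowD, mem_group_byColD, Bool.or_eq_true, beq_iff_eq]
      constructor
      · rintro (((⟨k, hk, rfl, hv⟩ | ⟨k, hk, rfl, hv⟩) | ⟨k, hk, rfl, hv⟩) | ⟨k, hk, rfl, hv⟩)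
        · exact ⟨k, hk, rfl, Or.inl (Or.inl (Or.inl hv))⟩
        · exact ⟨k, hk, rfl, Or.inl (Or.inl (Or.inr hv))⟩
        · exact ⟨k, hk, rfl, Or.inl (Or.inr hv)⟩
        · exact ⟨k, hk, rfl, Or.inr hv⟩
      · rintro ⟨k, hk, rfl, (((hv | hv) | hv) | hv)⟩
        · exact Or.inl (Or.inl (Or.inl ⟨k, hk, rfl, hv⟩))
        · exact Or.inl (Or.inl (Or.inr ⟨k, hk, rfl, hv⟩))
        · exact Or.inl (Or.inr ⟨k, hk, rfl, hv⟩)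
        · exact Or.inr ⟨k, hk, rfl, hv⟩
    rw [sorted_union_indices cs (fun p : Int × Int => p.1 == a || p.1 == b || p.2 == c || p.2 == d) _ hu,
      List.map_map]
    have hg : ∀ k ∈ (List.range cs.length).filter
        (fun k => (fun p : Int × Int => p.1 == a || p.1 == b || p.2 == c || p.2 == d) (cs.getD k (0, 0))),
        ((fun i => (PySem.List.pyGet? cs i).getD (0, 0)) ∘ fun k : Nat => ((k : Nat) : Int)) k
          = cs.getD k (0, 0) := by
      intro k _
      show (PySem.List.pyGet? cs ((k : Nat) : Int)).getD (0, 0) = cs.getD k (0, 0)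
      have hbr : (PySem.List.pyGet? cs ((k : Nat) : Int)).getD (0, 0)
          = PySem.List.pyGetD cs ((k : Nat) : Int) (0, 0) := rfl
      rw [hbr, PySem.List.pyGetD_natCast]
    have hfin := map_getD_filter_range cs (fun p : Int × Int => p.1 == a || p.1 == b || p.2 == c || p.2 == d)
    rw [List.map_congr_left hg, hfin]
    simp only [edge_starts, if_neg hcs]
    rw [← h_a, ← h_b, ← h_c, ← h_d]
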